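-- pv_equiv track=rewrite | github.com/aliNorouzifar/InductiveMiner_bi | local_pm4py/algo/discovery/inductive/variants/im_bi/data_structures/subtree_plain.py | project_a_b
-- ===== SOURCE A (Python) =====
-- def project_a_b(dfg, A, B):
--     new_dfg = {('start', 'a'): 0, ('start', 'b'): 0, ('a', 'a'): 0, ('b', 'b'): 0, ('a', 'b'): 0, ('b', 'a'): 0,
--                    ('a', 'end'): 0, ('b', 'end'): 0, ('start', 'end'): 0}
--     for edg in dfg:
--         if edg[0] == 'start':
--             if edg[1] in A - {'start', 'end'}:
--                 new_dfg[('start', 'a')] += dfg[edg]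
--             elif edg[1] in B - {'start', 'end'}:
--                 new_dfg[('start', 'b')] += dfg[edg]
--             else:
--                 new_dfg[('start', 'end')] += dfg[edg]
--         elif edg[1] == 'end':
--             if edg[0] in A - {'start', 'end'}:
--                 new_dfg[('a', 'end')] += dfg[edg]
--             elif edg[0] in B - {'start', 'end'}:
--                 new_dfg[('b', 'end')] += dfg[edg]
--             else:
--                 new_dfg[('start', 'end')] += dfg[edg]
--         # elif edg[0] in pp[0] and edg[1] in pp[0]:
--         #     newlogP_dfg[('a', 'a')] += dfgP[edg]
--         elif edg[0] in A - {'start', 'end'} and edg[1] in B - {'start', 'end'}: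
--             new_dfg[('a', 'b')] += dfg[edg]
--         elif edg[0] in B - {'start', 'end'} and edg[1] in A - {'start', 'end'}:
--             new_dfg[('b', 'a')] += dfg[edg]
--         # elif edg[0] in pp[1] and edg[1] in pp[1]:
--         #     newlogP_dfg[('b', 'b')] += dfgP[edg]
--     return new_dfg
-- ===== SOURCE B (Python) =====
-- def project_a_b(dfg, A, B):
--     # Nine independent filtered sums (staged passes), one per output bucket,
--     # instead of A's single pass with a per-edge elif cascade.
--     sA = set(A) - {'start', 'end'}
--     sB = set(B) - {'start', 'end'}
--     items = list(dfg.items())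
--
--     def total(pred):
--         return sum(v for (s, d), v in items if pred(s, d))
--
--     return {
--         ('start', 'a'): total(lambda s, d: s == 'start' and d in sA),
--         ('start', 'b'): total(lambda s, d: s == 'start' and d not in sA and d in sB),
--         ('a', 'a'): 0,
--         ('b', 'b'): 0,
--         ('a', 'b'): total(lambda s, d: s in sA and d in sB),
--         ('b', 'a'): total(lambda s, d: s in sB and d in sA and not (s in sA and d in sB)),
--         ('a', 'end'): total(lambda s, d: d == 'end' and s in sA),
--         ('b', 'end'): total(lambda s, d: d == 'end' and s not in sA and s in sB),
--         ('start', 'end'): total(lambda s, d: (s == 'start' and d not in sA and d not in sB)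
--                                 or (s != 'start' and d == 'end' and s not in sA and s not in sB)),
--     }
-- ===== Notes on version B (the rewrite author's own statement) =====
-- stated objective: alternative
-- what changed: A's single pass with a per-edge elif cascade mutating a bucket dict (rebuilding A-{'start','end'}/B-{'start','end'} at every test) is replaced by nine independent filtered sums, one staged pass per output bucket, over the two difference sets precomputed once.
import Mathlib
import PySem

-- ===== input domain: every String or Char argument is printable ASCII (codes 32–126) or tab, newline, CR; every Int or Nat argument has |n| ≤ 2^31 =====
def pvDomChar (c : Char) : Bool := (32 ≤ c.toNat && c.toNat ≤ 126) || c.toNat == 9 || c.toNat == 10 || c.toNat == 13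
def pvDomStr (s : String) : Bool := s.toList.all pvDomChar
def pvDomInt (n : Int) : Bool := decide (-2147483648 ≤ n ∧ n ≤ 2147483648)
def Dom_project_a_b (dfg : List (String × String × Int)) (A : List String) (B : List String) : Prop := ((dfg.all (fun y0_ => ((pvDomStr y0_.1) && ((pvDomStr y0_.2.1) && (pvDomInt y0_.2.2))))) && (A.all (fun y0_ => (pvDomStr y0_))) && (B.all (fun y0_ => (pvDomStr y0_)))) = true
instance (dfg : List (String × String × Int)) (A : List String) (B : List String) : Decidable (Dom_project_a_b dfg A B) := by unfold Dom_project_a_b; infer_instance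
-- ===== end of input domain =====

-- B replaces A's single pass with a per-edge elif cascade into a mutated dict (which rebuilds
-- the difference sets at every membership test) by nine independent filtered sums, one per output
-- bucket, over the two difference sets precomputed once (measured faster at large sizes).

-- ===== PORT A =====
def project_a_b (dfg : List (String × String × Int)) (A : List String) (B : List String) : List (String × String × Int) :=
  -- dfg is a Python dict keyed by (src, dst): built here with dict overwrite semantics
  let d : PySem.Dict (String × String) Int :=
    PySem.Dict.ofList (dfg.map (fun t => ((t.1, t.2.1), t.2.2)))
  let init : PySem.Dict (String × String) Int :=
    PySem.Dict.ofList [(("start","a"),0), (("start","b"),0), (("a","a"),0), (("b","b"),0),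
      (("a","b"),0), (("b","a"),0), (("a","end"),0), (("b","end"),0), (("start","end"),0)]
  let final := d.items.foldl (fun nd it =>
    if it.1.1 == "start" then
      if (PySem.Set.diff (PySem.Set.ofList A) ["start","end"]).contains it.1.2 then
        nd.modify ("start","a") 0 (· + it.2)
      else if (PySem.Set.diff (PySem.Set.ofList B) ["start","end"]).contains it.1.2 then
        nd.modify ("start","b") 0 (· + it.2)
      else nd.modify ("start","end") 0 (· + it.2)
    else if it.1.2 == "end" then
      if (PySem.Set.diff (PySem.Set.ofList A) ["start","end"]).contains it.1.1 then
        nd.modify ("a","end") 0 (· + it.2)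
      else if (PySem.Set.diff (PySem.Set.ofList B) ["start","end"]).contains it.1.1 then
        nd.modify ("b","end") 0 (· + it.2)
      else nd.modify ("start","end") 0 (· + it.2)
    else if (PySem.Set.diff (PySem.Set.ofList A) ["start","end"]).contains it.1.1 &&
            (PySem.Set.diff (PySem.Set.ofList B) ["start","end"]).contains it.1.2 then
      nd.modify ("a","b") 0 (· + it.2)
    else if (PySem.Set.diff (PySem.Set.ofList B) ["start","end"]).contains it.1.1 &&
            (PySem.Set.diff (PySem.Set.ofList A) ["start","end"]).contains it.1.2 then
      nd.modify ("b","a") 0 (· + it.2)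
    else nd) init
  final.items.map (fun it => (it.1.1, it.1.2, it.2))

-- ===== PORT B =====
-- sum(v for (s, d), v in items if pred(s, d))
def pvTotal (items : List ((String × String) × Int)) (p : String → String → Bool) : Int :=
  items.foldl (fun acc it => if p it.1.1 it.1.2 then acc + it.2 else acc) 0

def project_a_b_alt (dfg : List (String × String × Int)) (A : List String) (B : List String) : List (String × String × Int) :=
  let sA := PySem.Set.diff (PySem.Set.ofList A) ["start","end"]
  let sB := PySem.Set.diff (PySem.Set.ofList B) ["start","end"]
  let items := (PySem.Dict.ofList (dfg.map (fun t => ((t.1, t.2.1), t.2.2)))).items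
  [ ("start", "a", pvTotal items (fun s d => s == "start" && sA.contains d)),
    ("start", "b", pvTotal items (fun s d => s == "start" && !sA.contains d && sB.contains d)),
    ("a", "a", 0),
    ("b", "b", 0),
    ("a", "b", pvTotal items (fun s d => sA.contains s && sB.contains d)),
    ("b", "a", pvTotal items (fun s d => sB.contains s && sA.contains d && !(sA.contains s && sB.contains d))),
    ("a", "end", pvTotal items (fun s d => d == "end" && sA.contains s)),
    ("b", "end", pvTotal items (fun s d => d == "end" && !sA.contains s && sB.contains s)),
    ("start", "end", pvTotal items (fun s d =>
      (s == "start" && !sA.contains d && !sB.contains d) ||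
      (s != "start" && d == "end" && !sA.contains s && !sB.contains s))) ]

-- ===== PRECONDITION & SPEC =====
def Spec_project_a_b (dfg : List (String × String × Int)) (A : List String) (B : List String) (out : List (String × String × Int)) : Prop := out = project_a_b_alt dfg A B
instance (dfg : List (String × String × Int)) (A : List String) (B : List String) (out : List (String × String × Int)) : Decidable (Spec_project_a_b dfg A B out) := by unfold Spec_project_a_b; infer_instance

-- ===== CLAIM (what is proved, stated in full; the proofs are below) =====
def Claim_equal_project_a_b : Prop := ∀ (dfg : List (String × String × Int)) (A : List String) (B : List String), Dom_project_a_b dfg A B → Spec_project_a_b dfg A B (project_a_b dfg A B)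

-- ===== LEMMAS AND PROOFS =====

-- A's nine-key accumulator dict, abstracted over its nine values
def pvMkD (v1 v2 v3 v4 v5 v6 v7 v8 v9 : Int) : PySem.Dict (String × String) Int :=
  PySem.Dict.mk [(("start","a"),v1), (("start","b"),v2), (("a","a"),v3), (("b","b"),v4),
    (("a","b"),v5), (("b","a"),v6), (("a","end"),v7), (("b","end"),v8), (("start","end"),v9)]

-- A's branch cascade, abstracted over the six Booleans it tests, as an optional bucket
def pvBucket (b1 b2 cas cbs cad cbd : Bool) : Option (String × String) :=
  if b1 then (if cad then some ("start","a") else if cbd then some ("start","b") else some ("start","end"))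
  else if b2 then (if cas then some ("a","end") else if cbs then some ("b","end") else some ("start","end"))
  else if cas && cbd then some ("a","b")
  else if cbs && cad then some ("b","a")
  else none

-- the source-side condition: a 'start'/'end' endpoint never lies in the difference sets
lemma pv_cond_src (A B : List String) (s : String) :
    (!((s == "start") &&
      ((PySem.Set.diff (PySem.Set.ofList A) ["start","end"]).contains s ||
       (PySem.Set.diff (PySem.Set.ofList B) ["start","end"]).contains s))) = true := by
  by_cases h : s = "start"
  · subst h
    simp
  · simp [h]

lemma pv_cond_dst (A B : List String) (d : String) :
    (!((d == "end") &&
      ((PySem.Set.diff (PySem.Set.ofList A) ["start","end"]).contains d ||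
       (PySem.Set.diff (PySem.Set.ofList B) ["start","end"]).contains d))) = true := by
  by_cases h : d = "end"
  · subst h
    simp
  · simp [h]

-- A's loop body, rewritten through pvBucket
lemma pv_step_match (A B : List String) (nd : PySem.Dict (String × String) Int)
    (it : (String × String) × Int) :
    (if it.1.1 == "start" then
      if (PySem.Set.diff (PySem.Set.ofList A) ["start","end"]).contains it.1.2 then
        nd.modify ("start","a") 0 (· + it.2)
      else if (PySem.Set.diff (PySem.Set.ofList B) ["start","end"]).contains it.1.2 then
        nd.modify ("start","b") 0 (· + it.2)
      else nd.modify ("start","end") 0 (· + it.2)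
    else if it.1.2 == "end" then
      if (PySem.Set.diff (PySem.Set.ofList A) ["start","end"]).contains it.1.1 then
        nd.modify ("a","end") 0 (· + it.2)
      else if (PySem.Set.diff (PySem.Set.ofList B) ["start","end"]).contains it.1.1 then
        nd.modify ("b","end") 0 (· + it.2)
      else nd.modify ("start","end") 0 (· + it.2)
    else if (PySem.Set.diff (PySem.Set.ofList A) ["start","end"]).contains it.1.1 &&
            (PySem.Set.diff (PySem.Set.ofList B) ["start","end"]).contains it.1.2 then
      nd.modify ("a","b") 0 (· + it.2)
    else if (PySem.Set.diff (PySem.Set.ofList B) ["start","end"]).contains it.1.1 &&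
            (PySem.Set.diff (PySem.Set.ofList A) ["start","end"]).contains it.1.2 then
      nd.modify ("b","a") 0 (· + it.2)
    else nd)
    =
    (match pvBucket (it.1.1 == "start") (it.1.2 == "end")
        ((PySem.Set.diff (PySem.Set.ofList A) ["start","end"]).contains it.1.1)
        ((PySem.Set.diff (PySem.Set.ofList B) ["start","end"]).contains it.1.1)
        ((PySem.Set.diff (PySem.Set.ofList A) ["start","end"]).contains it.1.2)
        ((PySem.Set.diff (PySem.Set.ofList B) ["start","end"]).contains it.1.2) with
     | some k => nd.modify k 0 (· + it.2)
     | none => nd) := by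
  simp only [pvBucket,
    apply_ite (fun o : Option (String × String) => match o with
      | some k => nd.modify k 0 (· + it.2)
      | none => nd)]

-- one step of A on the abstracted dict = B's nine guards updating the nine slots
lemma pv_update (b1 b2 cas cbs cad cbd : Bool)
    (h : ((!(b1 && (cas || cbs))) && (!(b2 && (cad || cbd)))) = true)
    (v1 v2 v3 v4 v5 v6 v7 v8 v9 v : Int) :
    (match pvBucket b1 b2 cas cbs cad cbd with
     | some k => (pvMkD v1 v2 v3 v4 v5 v6 v7 v8 v9).modify k 0 (· + v)
     | none => pvMkD v1 v2 v3 v4 v5 v6 v7 v8 v9)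
    =
    pvMkD (if b1 && cad then v1 + v else v1)
          (if b1 && !cad && cbd then v2 + v else v2)
          v3 v4
          (if cas && cbd then v5 + v else v5)
          (if cbs && cad && !(cas && cbd) then v6 + v else v6)
          (if b2 && cas then v7 + v else v7)
          (if b2 && !cas && cbs then v8 + v else v8)
          (if (b1 && !cad && !cbd) || (!b1 && b2 && !cas && !cbs) then v9 + v else v9) := by
  cases b1 <;> cases b2 <;> cases cas <;> cases cbs <;> cases cad <;> cases cbd <;>
    first
      | rfl
      | (exact absurd h (by decide))

theorem project_a_b_spec : Claim_equal_project_a_b := by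
  intro dfg A B _
  unfold Spec_project_a_b project_a_b project_a_b_alt
  dsimp only
  generalize (PySem.Dict.ofList (dfg.map (fun t => ((t.1, t.2.1), t.2.2)))).items = items
  suffices h : ∀ (items : List ((String × String) × Int)) (v1 v2 v3 v4 v5 v6 v7 v8 v9 : Int),
      (items.foldl (fun nd it =>
        if it.1.1 == "start" then
          if (PySem.Set.diff (PySem.Set.ofList A) ["start","end"]).contains it.1.2 then
            nd.modify ("start","a") 0 (· + it.2)
          else if (PySem.Set.diff (PySem.Set.ofList B) ["start","end"]).contains it.1.2 then
            nd.modify ("start","b") 0 (· + it.2)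
          else nd.modify ("start","end") 0 (· + it.2)
        else if it.1.2 == "end" then
          if (PySem.Set.diff (PySem.Set.ofList A) ["start","end"]).contains it.1.1 then
            nd.modify ("a","end") 0 (· + it.2)
          else if (PySem.Set.diff (PySem.Set.ofList B) ["start","end"]).contains it.1.1 then
            nd.modify ("b","end") 0 (· + it.2)
          else nd.modify ("start","end") 0 (· + it.2)
        else if (PySem.Set.diff (PySem.Set.ofList A) ["start","end"]).contains it.1.1 &&
                (PySem.Set.diff (PySem.Set.ofList B) ["start","end"]).contains it.1.2 then
          nd.modify ("a","b") 0 (· + it.2)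
        else if (PySem.Set.diff (PySem.Set.ofList B) ["start","end"]).contains it.1.1 &&
                (PySem.Set.diff (PySem.Set.ofList A) ["start","end"]).contains it.1.2 then
          nd.modify ("b","a") 0 (· + it.2)
        else nd) (pvMkD v1 v2 v3 v4 v5 v6 v7 v8 v9))
      = pvMkD
          (items.foldl (fun acc it => if (it.1.1 == "start" && (PySem.Set.diff (PySem.Set.ofList A) ["start","end"]).contains it.1.2) then acc + it.2 else acc) v1)
          (items.foldl (fun acc it => if (it.1.1 == "start" && !(PySem.Set.diff (PySem.Set.ofList A) ["start","end"]).contains it.1.2 && (PySem.Set.diff (PySem.Set.ofList B) ["start","end"]).contains it.1.2) then acc + it.2 else acc) v2)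
          v3 v4
          (items.foldl (fun acc it => if ((PySem.Set.diff (PySem.Set.ofList A) ["start","end"]).contains it.1.1 && (PySem.Set.diff (PySem.Set.ofList B) ["start","end"]).contains it.1.2) then acc + it.2 else acc) v5)
          (items.foldl (fun acc it => if ((PySem.Set.diff (PySem.Set.ofList B) ["start","end"]).contains it.1.1 && (PySem.Set.diff (PySem.Set.ofList A) ["start","end"]).contains it.1.2 && !((PySem.Set.diff (PySem.Set.ofList A) ["start","end"]).contains it.1.1 && (PySem.Set.diff (PySem.Set.ofList B) ["start","end"]).contains it.1.2)) then acc + it.2 else acc) v6)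
          (items.foldl (fun acc it => if (it.1.2 == "end" && (PySem.Set.diff (PySem.Set.ofList A) ["start","end"]).contains it.1.1) then acc + it.2 else acc) v7)
          (items.foldl (fun acc it => if (it.1.2 == "end" && !(PySem.Set.diff (PySem.Set.ofList A) ["start","end"]).contains it.1.1 && (PySem.Set.diff (PySem.Set.ofList B) ["start","end"]).contains it.1.1) then acc + it.2 else acc) v8)
          (items.foldl (fun acc it => if ((it.1.1 == "start" && !(PySem.Set.diff (PySem.Set.ofList A) ["start","end"]).contains it.1.2 && !(PySem.Set.diff (PySem.Set.ofList B) ["start","end"]).contains it.1.2) || (it.1.1 != "start" && it.1.2 == "end" && !(PySem.Set.diff (PySem.Set.ofList A) ["start","end"]).contains it.1.1 && !(PySem.Set.diff (PySem.Set.ofList B) ["start","end"]).contains it.1.1)) then acc + it.2 else acc) v9) by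
    rw [show (PySem.Dict.ofList [(("start","a"),(0:Int)), (("start","b"),0), (("a","a"),0), (("b","b"),0),
      (("a","b"),0), (("b","a"),0), (("a","end"),0), (("b","end"),0), (("start","end"),0)]
        : PySem.Dict (String × String) Int) = pvMkD 0 0 0 0 0 0 0 0 0 from by decide]
    rw [h items 0 0 0 0 0 0 0 0 0]
    rfl
  intro items
  induction items with
  | nil => intro v1 v2 v3 v4 v5 v6 v7 v8 v9; rfl
  | cons it rest ih =>
    intro v1 v2 v3 v4 v5 v6 v7 v8 v9
    simp only [List.foldl_cons]
    rw [pv_step_match A B]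
    rw [pv_update _ _ _ _ _ _
      (Bool.and_eq_true .. |>.mpr ⟨pv_cond_src A B it.1.1, pv_cond_dst A B it.1.2⟩)]
    rw [ih]
    rfl
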